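-- pv_equiv track=rewrite | github.com/Karan05s/AcadBoost | app/services/analytics_precompute_service.py | _calculate_activity_streak
-- ===== SOURCE A (Python) =====
-- from typing import Dict, Any, List
--
-- def _calculate_activity_streak(weekly_data: List[Dict[str, Any]]) -> int:
--     """Calculate current activity streak in weeks"""
--     if not weekly_data:
--         return 0
--
--     streak = 0
--     for week_data in reversed(weekly_data):
--         if week_data.get('submission_count', 0) > 0:
--             streak += 1
--         else:
--             break
--
--     return streak
-- ===== SOURCE B (Python) =====
-- from typing import Dict, Any, List
--
-- def _calculate_activity_streak(weekly_data: List[Dict[str, Any]]) -> int: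
--     """Forward single pass: reset-on-gap counter; final value = trailing streak."""
--     streak = 0
--     for week_data in weekly_data:
--         if week_data.get('submission_count', 0) > 0:
--             streak += 1
--         else:
--             streak = 0
--     return streak
-- ===== Notes on version B (the rewrite author's own statement) =====
-- stated objective: simpler
-- what changed: Replaces the reversed()-and-break scan with a single forward pass that increments a counter on active weeks and resets it to 0 on gaps; the final counter equals the trailing streak, and the empty-list guard disappears.
import Mathlib
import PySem

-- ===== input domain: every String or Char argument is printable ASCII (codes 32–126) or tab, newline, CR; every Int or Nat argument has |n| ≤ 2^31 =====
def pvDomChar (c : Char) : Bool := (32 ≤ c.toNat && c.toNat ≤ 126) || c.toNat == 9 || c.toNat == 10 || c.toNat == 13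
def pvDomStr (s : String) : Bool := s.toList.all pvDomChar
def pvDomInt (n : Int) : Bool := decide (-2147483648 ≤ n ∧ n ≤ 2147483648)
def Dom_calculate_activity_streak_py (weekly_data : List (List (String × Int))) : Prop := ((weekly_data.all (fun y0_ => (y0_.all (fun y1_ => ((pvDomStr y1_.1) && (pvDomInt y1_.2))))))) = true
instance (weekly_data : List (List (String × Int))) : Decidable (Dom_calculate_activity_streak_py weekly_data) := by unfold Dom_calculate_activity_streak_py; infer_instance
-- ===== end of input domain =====

-- B replaces A's reversed()-with-break scan by one forward pass with a reset-on-gap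
-- counter (objective: simpler — no reversal and no empty-list guard).

-- week_data.get('submission_count', 0)
def pvSubCount (w : List (String × Int)) : Int :=
  (PySem.Dict.mk w).getD "submission_count" 0

-- ===== PORT A =====
-- the 'for … reversed … break' loop, carrying the streak accumulator
def pvALoop : List (List (String × Int)) → Int → Int
  | [], streak => streak
  | w :: rest, streak =>
      if pvSubCount w > 0 then pvALoop rest (streak + 1) else streak

def calculate_activity_streak_py (weekly_data : List (List (String × Int))) : Int :=
  if weekly_data = [] then 0 else pvALoop weekly_data.reverse 0

-- ===== PORT B =====
def calculate_activity_streak_py_alt (weekly_data : List (List (String × Int))) : Int :=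
  weekly_data.foldl (fun streak w => if pvSubCount w > 0 then streak + 1 else 0) 0

-- ===== PRECONDITION & SPEC =====
def Spec_calculate_activity_streak_py (weekly_data : List (List (String × Int))) (out : Int) : Prop := out = calculate_activity_streak_py_alt weekly_data
instance (weekly_data : List (List (String × Int))) (out : Int) : Decidable (Spec_calculate_activity_streak_py weekly_data out) := by unfold Spec_calculate_activity_streak_py; infer_instance

-- ===== CLAIM (what is proved, stated in full; the proofs are below) =====
def Claim_equal_calculate_activity_streak_py : Prop := ∀ (weekly_data : List (List (String × Int))), Dom_calculate_activity_streak_py weekly_data → Spec_calculate_activity_streak_py weekly_data (calculate_activity_streak_py weekly_data)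

-- ===== LEMMAS AND PROOFS =====
theorem pvALoop_shift (l : List (List (String × Int))) (s : Int) :
    pvALoop l s = s + pvALoop l 0 := by
  induction l generalizing s with
  | nil => simp [pvALoop]
  | cons w rest ih =>
      simp only [pvALoop]
      by_cases h : pvSubCount w > 0
      · simp only [if_pos h]
        rw [ih (s + 1), ih (0 + 1)]
        ring
      · simp [if_neg h]

theorem pvALoop_reverse_eq_foldl (l : List (List (String × Int))) :
    pvALoop l.reverse 0 =
      l.foldl (fun streak w => if pvSubCount w > 0 then streak + 1 else 0) 0 := by
  induction l using List.reverseRecOn with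
  | nil => simp [pvALoop]
  | append_singleton l w ih =>
      rw [List.reverse_append]
      simp only [List.reverse_singleton, List.singleton_append, List.foldl_append,
        List.foldl_cons, List.foldl_nil, pvALoop]
      by_cases h : pvSubCount w > 0
      · rw [if_pos h, if_pos h, pvALoop_shift, ih]; ring
      · rw [if_neg h, if_neg h]

-- ===== VERDICT (by name: the statement is the Claim_ definition above) =====
theorem calculate_activity_streak_py_spec : Claim_equal_calculate_activity_streak_py := by
  intro wd _
  unfold Spec_calculate_activity_streak_py calculate_activity_streak_py
  by_cases h : wd = []
  · simp [h, calculate_activity_streak_py_alt]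
  · rw [if_neg h, pvALoop_reverse_eq_foldl]
    rfl
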